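-- pv_equiv track=rewrite | github.com/SheaCooke/Python_Assignment | scrabble_scorer.py | vowel_bonus_scorer
-- ===== SOURCE A (Python) =====
-- import string
--
-- def vowel_bonus_scorer(word):
--     score = 0
--     vowles = ['a','e','i','o','u']
--     for i in word.lower():
--         if i in vowles:
--             score += 3
--         elif i in string.ascii_letters:
--             score += 1
--     return score
-- ===== SOURCE B (Python) =====
-- import string
--
-- def vowel_bonus_scorer(word):
--     w = word.lower()
--     letters = sum(c in string.ascii_letters for c in w)
--     vowels = sum(c in 'aeiou' for c in w)
--     return letters + 2 * vowels
-- ===== Notes on version B (the rewrite author's own statement) =====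
-- stated objective: alternative
-- what changed: Replaces the single conditional accumulator loop with two independent counts over word.lower() (letters and vowels) combined by the closed form letters + 2*vowels, since a vowel is also a letter and so nets 3.
import Mathlib
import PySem

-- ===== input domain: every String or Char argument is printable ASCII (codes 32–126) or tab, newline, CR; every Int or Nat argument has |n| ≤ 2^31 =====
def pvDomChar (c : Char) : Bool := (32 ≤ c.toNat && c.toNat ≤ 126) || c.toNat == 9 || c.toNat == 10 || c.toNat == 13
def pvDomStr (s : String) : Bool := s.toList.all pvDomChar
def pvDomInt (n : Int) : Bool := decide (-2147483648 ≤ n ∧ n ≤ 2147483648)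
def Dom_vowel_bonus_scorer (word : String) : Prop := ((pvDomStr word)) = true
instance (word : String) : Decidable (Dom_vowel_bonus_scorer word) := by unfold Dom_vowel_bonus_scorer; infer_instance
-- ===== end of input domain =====

-- B replaces A's single conditional accumulator with two independent counts
-- (letters, vowels) over word.lower(), combined as letters + 2*vowels (alternative decomposition).


-- ===== PORT A =====
def pvVowels : List Char := ['a','e','i','o','u']

-- string.ascii_letters as a list of characters
def pvAsciiLetters : List Char := "abcdefghijklmnopqrstuvwxyzABCDEFGHIJKLMNOPQRSTUVWXYZ".toList

def vowel_bonus_scorer (word : String) : Int :=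
  (PySem.Chars.lower word.toList).foldl
    (fun score i =>
      if i ∈ pvVowels then score + 3
      else if i ∈ pvAsciiLetters then score + 1
      else score) 0

-- ===== PORT B =====
def vowel_bonus_scorer_alt (word : String) : Int :=
  let w := PySem.Chars.lower word.toList
  let letters : Int := (w.map (fun c => if c ∈ pvAsciiLetters then (1 : Int) else 0)).sum
  let vowels : Int := (w.map (fun c => if c ∈ pvVowels then (1 : Int) else 0)).sum
  letters + 2 * vowels

-- ===== PRECONDITION & SPEC =====
def Spec_vowel_bonus_scorer (word : String) (out : Int) : Prop := out = vowel_bonus_scorer_alt word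
instance (word : String) (out : Int) : Decidable (Spec_vowel_bonus_scorer word out) := by unfold Spec_vowel_bonus_scorer; infer_instance

-- ===== CLAIM (what is proved, stated in full; the proofs are below) =====
def Claim_equal_vowel_bonus_scorer : Prop := ∀ (word : String), Dom_vowel_bonus_scorer word → Spec_vowel_bonus_scorer word (vowel_bonus_scorer word)

-- ===== LEMMAS AND PROOFS =====
-- every vowel is an ascii letter
theorem pvVowel_letter {c : Char} (h : c ∈ pvVowels) : c ∈ pvAsciiLetters := by
  fin_cases h <;> decide

theorem pv_fold_eq (l : List Char) : ∀ (a : Int),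
    l.foldl (fun score i =>
      if i ∈ pvVowels then score + 3
      else if i ∈ pvAsciiLetters then score + 1
      else score) a
    = a + (l.map (fun c => if c ∈ pvAsciiLetters then (1 : Int) else 0)).sum
        + 2 * (l.map (fun c => if c ∈ pvVowels then (1 : Int) else 0)).sum := by
  induction l with
  | nil => intro a; simp
  | cons c t ih =>
    intro a
    simp only [List.foldl_cons, List.map_cons, List.sum_cons, ih]
    by_cases hv : c ∈ pvVowels
    · have hl := pvVowel_letter hv
      simp [hv, hl]; ring
    · by_cases hl : c ∈ pvAsciiLetters <;> simp [hv, hl] <;> ring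

-- ===== VERDICT (by name: the statement is the Claim_ definition above) =====
theorem vowel_bonus_scorer_spec : Claim_equal_vowel_bonus_scorer := by
  intro word _
  unfold Spec_vowel_bonus_scorer vowel_bonus_scorer vowel_bonus_scorer_alt
  rw [pv_fold_eq]
  ring
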